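-- pv_equiv track=rewrite | github.com/avinash-doddi/LeetCode-Solutions | 2713-find-the-divisibility-array-of-a-string/2713-find-the-divisibility-array-of-a-string.py | divisibilityArray
-- ===== SOURCE A (Python) =====
-- from typing import List
--
-- def divisibilityArray(word: str, m: int) -> List[int]:
--     temp = 0; ans = []
--     for i in word:
--         temp = (temp*10 + int(i))
--         if temp % m == 0: ans.append(1)
--         else: ans.append(0)
--         temp %= m;
--     return ans
-- ===== SOURCE B (Python) =====
-- from typing import List
--
-- def divisibilityArray(word: str, m: int) -> List[int]:
--     # Stateless: each prefix value is recomputed from scratch with int().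
--     return [1 if int(word[:i + 1]) % m == 0 else 0 for i in range(len(word))]
-- ===== Notes on version B (the rewrite author's own statement) =====
-- stated objective: alternative
-- what changed: Replaced the stateful loop carrying a running remainder with a stateless list comprehension that recomputes each prefix value via int(word[:i+1]) % m.
-- outside the precondition, e.g. on divisibilityArray('', 0): A returns [], B returns []
import Mathlib
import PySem

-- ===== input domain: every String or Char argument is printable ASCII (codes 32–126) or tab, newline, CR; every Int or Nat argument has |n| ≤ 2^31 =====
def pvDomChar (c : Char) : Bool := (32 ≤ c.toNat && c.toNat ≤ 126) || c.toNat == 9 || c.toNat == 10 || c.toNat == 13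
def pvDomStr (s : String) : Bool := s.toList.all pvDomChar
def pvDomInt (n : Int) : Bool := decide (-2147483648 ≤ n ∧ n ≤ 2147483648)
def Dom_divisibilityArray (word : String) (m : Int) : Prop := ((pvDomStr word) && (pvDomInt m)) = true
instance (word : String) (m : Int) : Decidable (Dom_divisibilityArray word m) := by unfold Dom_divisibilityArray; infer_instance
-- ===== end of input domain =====

-- B replaces A's running-remainder loop with a stateless comprehension recomputing each
-- prefix with int(word[:i+1]) % m (alternative decomposition, not faster).

-- int(c) for a single digit character; exact on digit chars (Pre_ restricts to digits:
-- Python int() raises ValueError on any other character).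
def pvDigitVal (c : Char) : Int := (c.toNat : Int) - 48

-- ===== PORT A =====
def divisibilityArray (word : String) (m : Int) : List Int :=
  (word.toList.foldl
    (fun (st : Int × List Int) c =>
      let temp := st.1 * 10 + pvDigitVal c
      let ans := st.2 ++ [if PySem.Int.mod temp m = 0 then (1 : Int) else 0]
      (PySem.Int.mod temp m, ans))
    (0, [])).2

-- ===== PORT B =====
-- int(word[:i+1]) for a digit-only string = fold of digit values (exact there; Pre_).
def pvIntOfDigits (l : List Char) : Int := l.foldl (fun a c => a * 10 + pvDigitVal c) 0

def divisibilityArray_alt (word : String) (m : Int) : List Int :=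
  (PySem.List.pyRange 0 (word.toList.length) 1).map
    (fun i =>
      if PySem.Int.mod (pvIntOfDigits (PySem.List.slice word.toList (some 0) (some (i + 1)))) m = 0
      then (1 : Int) else 0)

-- ===== PRECONDITION & SPEC =====
-- Pre_ excludes the inputs where A (and B) raise: m = 0 (ZeroDivisionError) and any
-- non-digit character in word (ValueError from int()); the one non-raising corner it
-- also excludes is ('', 0), where the loop body never runs and both return [].
def Pre_divisibilityArray (word : String) (m : Int) : Prop :=
  m ≠ 0 ∧ word.toList.all (fun c => c.isDigit) = true
instance (word : String) (m : Int) : Decidable (Pre_divisibilityArray word m) := by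
  unfold Pre_divisibilityArray; infer_instance

def pvWitness_divisibilityArray : String × Int := ("21", 7)

def Spec_divisibilityArray (word : String) (m : Int) (out : List Int) : Prop := out = divisibilityArray_alt word m
instance (word : String) (m : Int) (out : List Int) : Decidable (Spec_divisibilityArray word m out) := by unfold Spec_divisibilityArray; infer_instance

-- ===== CLAIM (what is proved, stated in full; the proofs are below) =====
def Claim_equal_divisibilityArray : Prop := ∀ (word : String) (m : Int), Dom_divisibilityArray word m → Pre_divisibilityArray word m → Spec_divisibilityArray word m (divisibilityArray word m)

-- ===== LEMMAS AND PROOFS =====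

-- reducing the carried value mod m first does not change the next remainder
lemma pvMod_mod (m t d : Int) (hm : m ≠ 0) :
    PySem.Int.mod (PySem.Int.mod t m * 10 + d) m = PySem.Int.mod (t * 10 + d) m := by
  have e0 := PySem.Int.floordiv_mul_add_mod t m
  have e1 := PySem.Int.floordiv_mul_add_mod (PySem.Int.mod t m * 10 + d) m
  have e2 := PySem.Int.floordiv_mul_add_mod (t * 10 + d) m
  have hK : PySem.Int.mod (PySem.Int.mod t m * 10 + d) m - PySem.Int.mod (t * 10 + d) m
      = m * (PySem.Int.floordiv (t * 10 + d) m
             - PySem.Int.floordiv (PySem.Int.mod t m * 10 + d) m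
             - 10 * PySem.Int.floordiv t m) := by linear_combination e1 - e2 + 10 * e0
  set K := PySem.Int.floordiv (t * 10 + d) m
             - PySem.Int.floordiv (PySem.Int.mod t m * 10 + d) m
             - 10 * PySem.Int.floordiv t m with hKdef
  rcases lt_or_gt_of_ne hm with h | h
  · have b1 := PySem.Int.mod_neg_bounds (PySem.Int.mod t m * 10 + d) h
    have b2 := PySem.Int.mod_neg_bounds (t * 10 + d) h
    rcases lt_trichotomy K 0 with h' | h' | h'
    · nlinarith [hK, b1.1, b1.2, b2.1, b2.2]
    · rw [h', mul_zero] at hK; linarith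
    · nlinarith [hK, b1.1, b1.2, b2.1, b2.2]
  · have b1n := PySem.Int.mod_nonneg (PySem.Int.mod t m * 10 + d) h
    have b1l := PySem.Int.mod_lt (PySem.Int.mod t m * 10 + d) h
    have b2n := PySem.Int.mod_nonneg (t * 10 + d) h
    have b2l := PySem.Int.mod_lt (t * 10 + d) h
    rcases lt_trichotomy K 0 with h' | h' | h'
    · nlinarith [hK]
    · rw [h', mul_zero] at hK; linarith
    · nlinarith [hK]

-- A's loop, started at a reduced accumulator, emits the prefix-recomputation bits
lemma pvLoop_eq (m : Int) (hm : m ≠ 0) (l : List Char) : ∀ (P : Int) (acc : List Int),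
    (l.foldl
      (fun (st : Int × List Int) c =>
        (PySem.Int.mod (st.1 * 10 + pvDigitVal c) m,
          st.2 ++ [if PySem.Int.mod (st.1 * 10 + pvDigitVal c) m = 0 then (1 : Int) else 0]))
      (PySem.Int.mod P m, acc)).2
    = acc ++ (List.range l.length).map
        (fun i => if PySem.Int.mod ((l.take (i + 1)).foldl (fun a c => a * 10 + pvDigitVal c) P) m = 0
                  then (1 : Int) else 0) := by
  induction l with
  | nil => intro P acc; simp
  | cons c l ih =>
    intro P acc
    simp only [List.foldl_cons, List.length_cons, List.range_succ_eq_map, List.map_cons,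
      List.map_map]
    simp only [pvMod_mod m P (pvDigitVal c) hm]
    rw [ih (P * 10 + pvDigitVal c) (acc ++ [if PySem.Int.mod (P * 10 + pvDigitVal c) m = 0 then (1 : Int) else 0])]
    simp [Function.comp_def]

-- ===== VERDICT (by name: the statement is the Claim_ definition above) =====
theorem divisibilityArray_spec : Claim_equal_divisibilityArray := by
  intro word m _hdom hpre
  unfold Spec_divisibilityArray divisibilityArray divisibilityArray_alt
  have h0 : PySem.Int.mod (0 : Int) m = 0 := by simp [PySem.Int.mod]
  have key := pvLoop_eq m hpre.1 word.toList 0 []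
  rw [h0] at key
  refine Eq.trans key ?_
  rw [PySem.List.pyRange_one]
  simp only [List.map_map, List.nil_append, Int.sub_zero, Int.toNat_natCast]
  refine List.map_congr_left ?_
  intro k hk
  simp only [Function.comp_apply, zero_add]
  rw [PySem.List.slice_zero_start, PySem.List.slice_to word.toList (show (0:Int) ≤ (k : Int) + 1 by positivity),
    show ((k : Int) + 1).toNat = k + 1 by omega]
  simp [pvIntOfDigits]
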